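-- pv_equiv track=rewrite | github.com/mariaarranz/Year_3_Group_Project | PTR-Pos/CODE4/Codon_PTR.py | CodonTable
-- ===== SOURCE A (Python) =====
-- def CodonTable (my_seq):
--     CodonsDict = {
--     "UUU": 0, "UUC": 0, "UUA": 0, "UUG": 0, "CUU": 0,
--     "CUC": 0, "CUA": 0, "CUG": 0, "AUU": 0, "AUC": 0,
--     "AUA": 0, "AUG": 0, "GUU": 0, "GUC": 0, "GUA": 0,
--     "GUG": 0, "UAU": 0, "UAC": 0, "UAA": 0, "UAG": 0,
--     "CAU": 0, "CAC": 0, "CAA": 0, "CAG": 0, "AAU": 0,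
--     "AAC": 0, "AAA": 0, "AAG": 0, "GAU": 0, "GAC": 0,
--     "GAA": 0, "GAG": 0, "UCU": 0, "UCC": 0, "UCA": 0,
--     "UCG": 0, "CCU": 0, "CCC": 0, "CCA": 0, "CCG": 0,
--     "ACU": 0, "ACC": 0, "ACA": 0, "ACG": 0, "GCU": 0,
--     "GCC": 0, "GCA": 0, "GCG": 0, "UGU": 0, "UGC": 0,
--     "UGA": 0, "UGG": 0, "CGU": 0, "CGC": 0, "CGA": 0,
--     "CGG": 0, "AGU": 0, "AGC": 0, "AGA": 0, "AGG": 0,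
--     "GGU": 0, "GGC": 0, "GGA": 0, "GGG": 0}
--     list_nucleotides =[my_seq[i:i+3] for i in range(0, len(my_seq), 3)]
--     NumberCodons=0
--     for nucleotide in list_nucleotides:
--         if not nucleotide in CodonsDict:
--             continue
--
--         else:
--             CodonsDict[nucleotide]+= 1
--             NumberCodons+=1
--     return CodonsDict
-- ===== SOURCE B (Python) =====
-- def CodonTable(my_seq):
--     codons = [
--         "UUU", "UUC", "UUA", "UUG", "CUU", "CUC", "CUA", "CUG",
--         "AUU", "AUC", "AUA", "AUG", "GUU", "GUC", "GUA", "GUG",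
--         "UAU", "UAC", "UAA", "UAG", "CAU", "CAC", "CAA", "CAG",
--         "AAU", "AAC", "AAA", "AAG", "GAU", "GAC", "GAA", "GAG",
--         "UCU", "UCC", "UCA", "UCG", "CCU", "CCC", "CCA", "CCG",
--         "ACU", "ACC", "ACA", "ACG", "GCU", "GCC", "GCA", "GCG",
--         "UGU", "UGC", "UGA", "UGG", "CGU", "CGC", "CGA", "CGG",
--         "AGU", "AGC", "AGA", "AGG", "GGU", "GGC", "GGA", "GGG"]
--     # one independent scan of the input per codon: no mutable dict, loops inverted
--     return {c: sum(my_seq[i:i+3] == c for i in range(0, len(my_seq), 3))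
--             for c in codons}
-- ===== Notes on version B (the rewrite author's own statement) =====
-- stated objective: alternative
-- what changed: A makes one pass over the input updating a mutable 64-key dict (skip-or-increment per trigram); B has no dict and no single counting pass: it inverts the loops, iterating over the fixed 64 codons and for each one scanning the stride-3 positions of the input to count occurrences of that codon.
import Mathlib
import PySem

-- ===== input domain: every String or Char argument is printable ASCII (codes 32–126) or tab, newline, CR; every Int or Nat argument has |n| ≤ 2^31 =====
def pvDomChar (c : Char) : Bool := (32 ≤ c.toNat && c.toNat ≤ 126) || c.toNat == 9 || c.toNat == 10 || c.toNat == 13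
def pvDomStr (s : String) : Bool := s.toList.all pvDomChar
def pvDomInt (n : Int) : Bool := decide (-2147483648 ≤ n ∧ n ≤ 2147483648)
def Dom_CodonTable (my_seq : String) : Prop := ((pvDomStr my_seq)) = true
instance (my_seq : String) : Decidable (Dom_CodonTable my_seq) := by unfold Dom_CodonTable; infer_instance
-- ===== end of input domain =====

-- B replaces A's single dict-updating pass by a loop over the fixed 64 codons, each counting its own stride-3 occurrences in the input; return value only, same results.

-- ===== PORT A =====
-- the 64-codon dict literal of A, as its pair list (insertion order preserved)
def codonPairs : List (String × Int) :=
  [("UUU", 0), ("UUC", 0), ("UUA", 0), ("UUG", 0), ("CUU", 0),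
   ("CUC", 0), ("CUA", 0), ("CUG", 0), ("AUU", 0), ("AUC", 0),
   ("AUA", 0), ("AUG", 0), ("GUU", 0), ("GUC", 0), ("GUA", 0),
   ("GUG", 0), ("UAU", 0), ("UAC", 0), ("UAA", 0), ("UAG", 0),
   ("CAU", 0), ("CAC", 0), ("CAA", 0), ("CAG", 0), ("AAU", 0),
   ("AAC", 0), ("AAA", 0), ("AAG", 0), ("GAU", 0), ("GAC", 0),
   ("GAA", 0), ("GAG", 0), ("UCU", 0), ("UCC", 0), ("UCA", 0),
   ("UCG", 0), ("CCU", 0), ("CCC", 0), ("CCA", 0), ("CCG", 0),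
   ("ACU", 0), ("ACC", 0), ("ACA", 0), ("ACG", 0), ("GCU", 0),
   ("GCC", 0), ("GCA", 0), ("GCG", 0), ("UGU", 0), ("UGC", 0),
   ("UGA", 0), ("UGG", 0), ("CGU", 0), ("CGC", 0), ("CGA", 0),
   ("CGG", 0), ("AGU", 0), ("AGC", 0), ("AGA", 0), ("AGG", 0),
   ("GGU", 0), ("GGC", 0), ("GGA", 0), ("GGG", 0)]

def CodonTable (my_seq : String) : List (String × Int) :=
  let codonsDict : PySem.Dict String Int := PySem.Dict.ofList codonPairs
  let list_nucleotides : List String :=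
    (PySem.List.pyRange 0 (PySem.Str.len my_seq) 3).map
      (fun i => PySem.Str.slice my_seq (some i) (some (i + 3)))
  -- the loop carries (CodonsDict, NumberCodons); NumberCodons is returned by neither program
  let st : PySem.Dict String Int × Int :=
    list_nucleotides.foldl
      (fun st nucleotide =>
        if st.1.contains nucleotide then
          (st.1.insert nucleotide (st.1.getD nucleotide 0 + 1), st.2 + 1)
        else st)
      (codonsDict, 0)
  st.1.items

-- ===== PORT B =====
-- B's fixed 64-codon key list
def codonList : List String :=
  ["UUU", "UUC", "UUA", "UUG", "CUU", "CUC", "CUA", "CUG",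
   "AUU", "AUC", "AUA", "AUG", "GUU", "GUC", "GUA", "GUG",
   "UAU", "UAC", "UAA", "UAG", "CAU", "CAC", "CAA", "CAG",
   "AAU", "AAC", "AAA", "AAG", "GAU", "GAC", "GAA", "GAG",
   "UCU", "UCC", "UCA", "UCG", "CCU", "CCC", "CCA", "CCG",
   "ACU", "ACC", "ACA", "ACG", "GCU", "GCC", "GCA", "GCG",
   "UGU", "UGC", "UGA", "UGG", "CGU", "CGC", "CGA", "CGG",
   "AGU", "AGC", "AGA", "AGG", "GGU", "GGC", "GGA", "GGG"]

-- per-codon inner scan: sum(my_seq[i:i+3] == c for i in range(0, len(my_seq), 3))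
def CodonTable_alt (my_seq : String) : List (String × Int) :=
  codonList.map (fun c =>
    (c, (PySem.List.pyRange 0 (PySem.Str.len my_seq) 3).foldl
          (fun acc i =>
            acc + (if PySem.Str.slice my_seq (some i) (some (i + 3)) = c then 1 else 0))
          0))

-- ===== PRECONDITION & SPEC =====
def Spec_CodonTable (my_seq : String) (out : List (String × Int)) : Prop := out = CodonTable_alt my_seq
instance (my_seq : String) (out : List (String × Int)) : Decidable (Spec_CodonTable my_seq out) := by unfold Spec_CodonTable; infer_instance

-- ===== CLAIM (what is proved, stated in full; the proofs are below) =====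
def Claim_equal_CodonTable : Prop := ∀ (my_seq : String), Dom_CodonTable my_seq → Spec_CodonTable my_seq (CodonTable my_seq)

-- ===== LEMMAS AND PROOFS =====

-- the dict component of A's loop, alone
def stepD (d : PySem.Dict String Int) (c : String) : PySem.Dict String Int :=
  if d.contains c then d.insert c (d.getD c 0 + 1) else d

-- A's loop carries (dict, NumberCodons); its dict component is the dict-only fold
lemma foldA_fst (l : List String) (d : PySem.Dict String Int) (n : Int) :
    (l.foldl (fun st c =>
        if st.1.contains c then (st.1.insert c (st.1.getD c 0 + 1), st.2 + 1) else st)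
      (d, n)).1 = l.foldl stepD d := by
  induction l generalizing d n with
  | nil => rfl
  | cons c t ih =>
      simp only [List.foldl_cons, stepD]
      by_cases h : d.contains c = true
      · simp [h, ih]
      · simp [h, ih]

lemma foldD_keys (l : List String) (d : PySem.Dict String Int) :
    (l.foldl stepD d).keys = d.keys := by
  induction l generalizing d with
  | nil => rfl
  | cons c t ih =>
      simp only [List.foldl_cons, stepD]
      by_cases h : d.contains c = true
      · simp [h, ih, PySem.Dict.keys_insert_of_contains d _ h]
      · simp [h, ih]

lemma foldD_getD (l : List String) (d : PySem.Dict String Int) (k : String) :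
    (l.foldl stepD d).getD k 0 =
      d.getD k 0 + (if d.contains k = true then (l.count k : Int) else 0) := by
  induction l generalizing d with
  | nil => simp
  | cons c t ih =>
      simp only [List.foldl_cons, stepD]
      by_cases hc : d.contains c = true
      · simp only [hc, if_true]
        rw [ih]
        by_cases hk : k = c
        · subst hk
          simp [hc, List.count_cons_self]
          ring
        · have hne : (k == c) = false := by simpa using hk
          have hck : ¬ c = k := fun h => hk h.symm
          rw [PySem.Dict.getD_insert, PySem.Dict.contains_insert]
          simp [hne, hk, hck]
      · simp only [hc]
        rw [ih]
        by_cases hk : d.contains k = true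
        · have hne : k ≠ c := fun h => by rw [h] at hk; exact hc hk
          have hbe : (c == k) = false := by simpa using (Ne.symm hne)
          simp [hk, List.count_cons, hbe]
        · simp [hk]

-- B's inner scan sums indicators: it computes the count of c among the mapped trigrams
lemma foldB_count (l : List Int) (f : Int → String) (c : String) (acc : Int) :
    l.foldl (fun a i => a + (if f i = c then 1 else 0)) acc
      = acc + ((l.map f).count c : Int) := by
  induction l generalizing acc with
  | nil => simp
  | cons i t ih =>
      simp only [List.foldl_cons, List.map_cons, List.count_cons]
      rw [ih]
      by_cases h : f i = c
      · simp [h]; ring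
      · have hbe : (f i == c) = false := by simpa using h
        simp [h, hbe]

set_option maxHeartbeats 4000000 in
set_option maxRecDepth 100000 in
lemma base_keys : (PySem.Dict.ofList codonPairs : PySem.Dict String Int).keys = codonList := by
  decide

set_option maxHeartbeats 4000000 in
set_option maxRecDepth 100000 in
lemma base_nodup : (PySem.Dict.ofList codonPairs : PySem.Dict String Int).keys.Nodup := by
  decide

set_option maxHeartbeats 4000000 in
set_option maxRecDepth 100000 in
lemma base_mem : ∀ k ∈ codonList,
    (PySem.Dict.ofList codonPairs : PySem.Dict String Int).contains k = true ∧
    (PySem.Dict.ofList codonPairs : PySem.Dict String Int).getD k 0 = 0 := by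
  decide

-- ===== VERDICT (by name: the statement is the Claim_ definition above) =====
theorem CodonTable_spec : Claim_equal_CodonTable := by
  intro my_seq _
  unfold Spec_CodonTable CodonTable CodonTable_alt
  set idxs : List Int := PySem.List.pyRange 0 (PySem.Str.len my_seq) 3 with hidxs
  set f : Int → String := fun i => PySem.Str.slice my_seq (some i) (some (i + 3)) with hf
  simp only
  rw [foldA_fst (idxs.map f) (PySem.Dict.ofList codonPairs) 0]
  have hnodup : ((idxs.map f).foldl stepD (PySem.Dict.ofList codonPairs)).keys.Nodup := by
    rw [foldD_keys]; exact base_nodup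
  rw [PySem.Dict.items_eq_map_keys _ hnodup 0, foldD_keys, base_keys]
  apply List.map_congr_left
  intro k hk
  obtain ⟨hcontains, hzero⟩ := base_mem k hk
  rw [foldD_getD, hcontains, hzero, foldB_count idxs f k 0]
  simp
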